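-- pv_equiv track=rewrite | github.com/HmirceaD/PythonCheckIpSubnetting | IpAnalyzer.py | buildBroadcastArray
-- ===== SOURCE A (Python) =====
-- def createSubnetMask(maskBits):
--
--     tempMask = [0, 0, 0, 0]
--
--     #because bitwise left me wanting to kill myself :)
--     index = 0
--     threshhold = 0
--     for i in range(0, int(maskBits)):
--         threshhold += 1
--         if(threshhold is 8):
--             tempMask[index] = (2**threshhold)-1
--             index += 1
--             threshhold = 0
--
--     if(threshhold > 0 and index < 4):
--         tempMask[index] = (2 ** threshhold) - 1
--
--     return tempMask
--
-- def buildBroadcastArray(ip1, masks):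
--
--     cidr = 32 - int(masks[0][0])
--     broadcastMask = createSubnetMask(cidr)
--     broadcastMask.reverse()
--     broadcastAddress = []
--     for i in range(len(ip1)):
--         broadcastAddress.append(int(ip1[i]) | broadcastMask[i])
--     return broadcastAddress
-- ===== SOURCE B (Python) =====
-- def buildBroadcastArray(ip1, masks):
--     host = 32 - int(masks[0][0])
--     mask = [(1 << max(0, min(8, host - 8 * (3 - p)))) - 1 for p in range(4)]
--     return [int(ip1[i]) | mask[i] for i in range(len(ip1))]
-- ===== Notes on version B (the rewrite author's own statement) =====
-- stated objective: idiomatic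
-- what changed: Replaces the per-bit counting state machine (threshold/index loop over cidr bits, then list reverse) with a closed-form per-octet clamped-shift wildcard mask, and builds the result with comprehensions.
-- outside the precondition, e.g. on buildBroadcastArray(['1', '2', '3', '4'], [[-8]]): A raises IndexError, B returns [255, 255, 255, 255]
import Mathlib
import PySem

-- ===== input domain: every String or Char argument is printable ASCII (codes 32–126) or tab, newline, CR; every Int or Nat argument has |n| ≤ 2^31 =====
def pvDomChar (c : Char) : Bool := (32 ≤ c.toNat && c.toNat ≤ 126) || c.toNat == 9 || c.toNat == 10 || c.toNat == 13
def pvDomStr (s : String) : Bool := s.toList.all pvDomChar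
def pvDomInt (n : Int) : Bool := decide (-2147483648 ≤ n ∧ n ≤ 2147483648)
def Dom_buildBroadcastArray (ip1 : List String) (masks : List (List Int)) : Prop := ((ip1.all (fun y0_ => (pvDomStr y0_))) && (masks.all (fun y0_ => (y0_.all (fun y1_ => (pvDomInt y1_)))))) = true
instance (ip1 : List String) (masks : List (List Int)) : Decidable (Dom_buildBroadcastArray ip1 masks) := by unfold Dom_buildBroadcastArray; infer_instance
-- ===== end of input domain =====

-- B replaces A's per-bit counting state machine for the wildcard mask by a closed-form per-octet
-- shift formula (idiomatic; return value only).


-- ===== PORT A =====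
def createSubnetMask (maskBits : Int) : List Int :=
  let s := (PySem.List.pyRange 0 maskBits 1).foldl
    (fun (st : List Int × Int × Int) _ =>
      let tempMask := st.1
      let index := st.2.1
      let threshhold := st.2.2 + 1
      if threshhold = 8 then
        (tempMask.set index.toNat (2 ^ threshhold.toNat - 1), index + 1, 0)
      else
        (tempMask, index, threshhold))
    ([0, 0, 0, 0], 0, 0)
  if 0 < s.2.2 ∧ s.2.1 < 4 then s.1.set s.2.1.toNat (2 ^ s.2.2.toNat - 1) else s.1

def buildBroadcastArray (ip1 : List String) (masks : List (List Int)) : List Int :=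
  let cidr : Int := 32 - (masks.headD []).headD 0
  let broadcastMask := (createSubnetMask cidr).reverse
  (List.range ip1.length).foldl
    (fun acc i =>
      acc ++ [PySem.Int.bor ((PySem.Int.ofStr? (ip1.getD i "")).getD 0) (broadcastMask.getD i 0)])
    []

-- ===== PORT B =====
def buildBroadcastArray_alt (ip1 : List String) (masks : List (List Int)) : List Int :=
  let host : Int := 32 - (masks.headD []).headD 0
  let mask := (List.range 4).map
    (fun p => ((1 : Int) <<< (max 0 (min 8 (host - 8 * (3 - (p : Int))))).toNat) - 1)
  (List.range ip1.length).map
    (fun i => PySem.Int.bor ((PySem.Int.ofStr? (ip1.getD i "")).getD 0) (mask.getD i 0))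

-- ===== PRECONDITION & SPEC =====
-- Pre_ excludes exactly the inputs where the Python A raises: empty masks / empty first row
-- (IndexError), a first mask entry below -7 (cidr ≥ 40, IndexError inside createSubnetMask),
-- more than 4 address octets (IndexError on broadcastMask), or an octet string int() rejects
-- (ValueError).
def Pre_buildBroadcastArray (ip1 : List String) (masks : List (List Int)) : Prop :=
  masks ≠ [] ∧ (masks.headD []) ≠ [] ∧ -7 ≤ (masks.headD []).headD 0 ∧
  ip1.length ≤ 4 ∧ ∀ s ∈ ip1, (PySem.Int.ofStr? s).isSome
instance (ip1 : List String) (masks : List (List Int)) : Decidable (Pre_buildBroadcastArray ip1 masks) := by unfold Pre_buildBroadcastArray; infer_instance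

def pvWitness_buildBroadcastArray : List String × List (List Int) :=
  (["192", "168", "1", "10"], [[24]])

def Spec_buildBroadcastArray (ip1 : List String) (masks : List (List Int)) (out : List Int) : Prop := out = buildBroadcastArray_alt ip1 masks
instance (ip1 : List String) (masks : List (List Int)) (out : List Int) : Decidable (Spec_buildBroadcastArray ip1 masks out) := by unfold Spec_buildBroadcastArray; infer_instance

-- ===== CLAIM (what is proved, stated in full; the proofs are below) =====
def Claim_equal_buildBroadcastArray : Prop := ∀ (ip1 : List String) (masks : List (List Int)), Dom_buildBroadcastArray ip1 masks → Pre_buildBroadcastArray ip1 masks → Spec_buildBroadcastArray ip1 masks (buildBroadcastArray ip1 masks)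

-- ===== LEMMAS AND PROOFS =====

-- a clamped-shift octet is 0 whenever the host-bit count is ≤ 0
theorem shift_zero (c k : Int) (hc : c ≤ 0) (hk : 0 ≤ k) :
    ((1 : Int) <<< (max 0 (min 8 (c - k))).toNat) - 1 = 0 := by
  have h : max 0 (min 8 (c - k)) = 0 := by omega
  rw [h]
  decide

-- the reversed counting-loop mask equals B's closed-form mask, for every host-bit count ≤ 39
theorem maskEq (c : Int) (h : c ≤ 39) :
    (createSubnetMask c).reverse =
      (List.range 4).map
        (fun p => ((1 : Int) <<< (max 0 (min 8 (c - 8 * (3 - (p : Int))))).toNat) - 1) := by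
  by_cases hc : c ≤ 0
  · have hA : createSubnetMask c = [0, 0, 0, 0] := by
      unfold createSubnetMask
      rw [PySem.List.pyRange_one_eq_nil (by omega)]
      simp
    rw [hA]
    have h0 := shift_zero c 24 hc (by norm_num)
    have h1 := shift_zero c 16 hc (by norm_num)
    have h2 := shift_zero c 8 hc (by norm_num)
    have h3 := shift_zero c 0 hc (by norm_num)
    simp only [show List.range 4 = [0, 1, 2, 3] from rfl]
    norm_num at h0 h1 h2 h3 ⊢
    exact ⟨h0.symm, h1.symm, h2.symm, h3.symm⟩
  · push Not at hc
    interval_cases c <;> decide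

theorem foldl_push {α β : Type} (l : List α) (f : α → β) (init : List β) :
    l.foldl (fun acc i => acc ++ [f i]) init = init ++ l.map f := by
  induction l generalizing init with
  | nil => simp
  | cons a t ih => simp [List.foldl, ih]

-- ===== VERDICT (by name: the statement is the Claim_ definition above) =====
theorem buildBroadcastArray_spec : Claim_equal_buildBroadcastArray := by
  intro ip1 masks _ hpre
  obtain ⟨_, _, hm, _, _⟩ := hpre
  unfold Spec_buildBroadcastArray
  simp only [buildBroadcastArray, buildBroadcastArray_alt]
  rw [foldl_push, List.nil_append, maskEq _ (by omega)]
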